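-- pv_equiv track=rewrite | github.com/kbsezginel/angstrom | angstrom/molecule/angles.py | get_angles
-- ===== SOURCE A (Python) =====
-- def get_angles(bonds):
--     """
--     Iterate through bonds to get angles.
--     Bonds should NOT contain duplicates.
--
--     Parameters
--     ----------
--     bonds : list
--         List of bonded atoms.
--
--     Returns
--     -------
--     list
--         List of atom id triplets that make up an angle.
--     """
--     angles = []
--     for i1, b1 in enumerate(bonds):
--         for i2, b2 in enumerate(bonds):
--             if i2 > i1:
--                 shared_atom = list(set(b1) & set(b2))
--                 if len(shared_atom) > 0:
--                     atom1 = [b for b in b1 if b != shared_atom[0]][0]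
--                     atom2 = [b for b in b2 if b != shared_atom[0]][0]
--                     other_atoms = sorted([atom1, atom2])
--                     angles.append((other_atoms[0], shared_atom[0], other_atoms[1]))
--     return sorted(angles)
-- ===== SOURCE B (Python) =====
-- def get_angles(bonds):
--     # Adjacency map atom -> neighbour atoms (one entry per bond containing the
--     # atom, in bond order); angles are the neighbour pairs around each centre
--     # atom, so no bond-pair scan and no set intersections are needed.
--     adj = {}
--     for b in bonds:
--         seen = set()
--         for s in b:
--             if s in seen:
--                 continue
--             seen.add(s)
--             others = [a for a in b if a != s]
--             if others:
--                 adj.setdefault(s, []).append(others[0])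
--     angles = []
--     for c, ns in adj.items():
--         for i, a in enumerate(ns):
--             for o in ns[i + 1:]:
--                 if a <= o:
--                     angles.append((a, c, o))
--                 else:
--                     angles.append((o, c, a))
--     return sorted(angles)
-- ===== Notes on version B (the rewrite author's own statement) =====
-- stated objective: alternative
-- what changed: A scans all O(n^2) bond pairs and intersects their atom sets; B builds an adjacency map atom->neighbour list in one pass over the bonds and reads each angle off the neighbour pairs around its centre atom, so no bond-pair scan and no set intersections remain (a timing run could not credit a speed-up, so none is claimed).
-- outside the precondition, e.g. on get_angles([[1, 2], [2, 1]]): A returns [(2, 1, 2)], B returns [(1, 2, 1), (2, 1, 2)]; on get_angles([[1, 2, 3], [2, 3, 4]]): A returns [(1, 2, 3)], B returns [(1, 2, 3), (1, 3, 2)]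
import Mathlib
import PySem

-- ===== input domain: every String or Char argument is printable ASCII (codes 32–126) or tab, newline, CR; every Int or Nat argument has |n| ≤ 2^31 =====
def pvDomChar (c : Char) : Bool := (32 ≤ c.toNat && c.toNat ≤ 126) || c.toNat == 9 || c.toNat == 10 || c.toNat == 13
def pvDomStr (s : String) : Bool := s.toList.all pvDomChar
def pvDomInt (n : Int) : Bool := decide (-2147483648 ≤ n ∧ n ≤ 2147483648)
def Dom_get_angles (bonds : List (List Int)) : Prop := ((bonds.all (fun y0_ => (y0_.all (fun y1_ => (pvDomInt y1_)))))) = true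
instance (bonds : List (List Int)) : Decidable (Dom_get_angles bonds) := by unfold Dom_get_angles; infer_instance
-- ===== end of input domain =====

-- B replaces A's O(n^2) all-pairs bond scan by an adjacency map atom -> neighbour list,
-- reading each angle off the neighbour pairs around its centre atom; equivalence is about
-- the return value.

-- Python tuples compare lexicographically: the key for sorted(angles) is the lexicographic order on triples.
def pvKey (t : Int × Int × Int) : Lex (Int × Lex (Int × Int)) := toLex (t.1, toLex (t.2.1, t.2.2))

-- ===== PORT A =====
def get_angles (bonds : List (List Int)) : List (Int × Int × Int) :=
  let angles : List (Int × Int × Int) :=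
    (PySem.List.enumerate bonds).foldl (fun acc p1 =>
      (PySem.List.enumerate bonds).foldl (fun acc p2 =>
        if p2.1 > p1.1 then
          let shared := PySem.Set.inter (PySem.Set.ofList p1.2) (PySem.Set.ofList p2.2)
          if shared.length > 0 then
            let s := PySem.List.pyGetD shared 0 0          -- shared_atom[0]; list nonempty here
            -- [b for b in bi if b != shared_atom[0]][0]; the IndexError case (no such b) is outside Pre_
            let atom1 := PySem.List.pyGetD (p1.2.filter (fun b => b != s)) 0 0
            let atom2 := PySem.List.pyGetD (p2.2.filter (fun b => b != s)) 0 0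
            let oa := PySem.List.sorted [atom1, atom2] (fun x => x)
            acc ++ [(PySem.List.pyGetD oa 0 0, s, PySem.List.pyGetD oa 1 0)]
          else acc
        else acc) acc) []
  PySem.List.sorted angles pvKey

-- ===== PORT B =====
-- (lo, c, hi): the angle triple around centre c, endpoints in sorted order (Source B's if/else)
def pvTri (a c b : Int) : Int × Int × Int := if a ≤ b then (a, c, b) else (b, c, a)

-- the two inner loops over ns: for i, a in enumerate(ns): for o in ns[i+1:]
def pvAnglesAt (c : Int) : List Int → List (Int × Int × Int)
  | [] => []
  | a :: rest => rest.map (fun b => pvTri a c b) ++ pvAnglesAt c rest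

def get_angles_alt (bonds : List (List Int)) : List (Int × Int × Int) :=
  let adj : PySem.Dict Int (List Int) := bonds.foldl (fun adj b =>
    -- for s in b: if s in seen: continue; seen.add(s); others = [a for a in b if a != s];
    -- if others: adj.setdefault(s, []).append(others[0])
    (b.foldl (fun (st : PySem.Set Int × PySem.Dict Int (List Int)) s =>
        if PySem.Set.contains st.1 s then st
        else
          let seen := PySem.Set.add st.1 s
          let others := b.filter (fun a => a != s)
          if others.isEmpty then (seen, st.2)
          else (seen, st.2.modify s [] (fun l => l ++ [PySem.List.pyGetD others 0 0])))
      (PySem.Set.empty, adj)).2) PySem.Dict.empty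
  let angles : List (Int × Int × Int) :=
    adj.items.foldl (fun acc ci => acc ++ pvAnglesAt ci.1 ci.2) []
  PySem.List.sorted angles pvKey

-- ===== PRECONDITION & SPEC =====
-- the distinct atoms two bonds share (= set(b1) & set(b2), in b1's first-occurrence order)
def pvCommons (b1 b2 : List Int) : List Int :=
  PySem.Set.inter (PySem.Set.ofList b1) (PySem.Set.ofList b2)

-- Pre_ excludes exactly (a) bond pairs sharing two or more atoms — there A picks the shared
-- atom by CPython's set iteration (hash) order, an accident of A's implementation — and
-- (b) bond pairs sharing an atom where one bond has no second atom, on which A raises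
-- IndexError on [b for b in bi if b != shared][0].
def Pre_get_angles (bonds : List (List Int)) : Prop :=
  List.Pairwise (fun b1 b2 => (pvCommons b1 b2).length ≤ 1 ∧
    ∀ s ∈ pvCommons b1 b2,
      b1.filter (fun a => a != s) ≠ [] ∧ b2.filter (fun a => a != s) ≠ []) bonds
instance (bonds : List (List Int)) : Decidable (Pre_get_angles bonds) := by
  unfold Pre_get_angles; infer_instance

def pvWitness_get_angles : List (List Int) := [[1, 2], [2, 3], [2, 4], [4, 5]]

def Spec_get_angles (bonds : List (List Int)) (out : List (Int × Int × Int)) : Prop := out = get_angles_alt bonds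
instance (bonds : List (List Int)) (out : List (Int × Int × Int)) : Decidable (Spec_get_angles bonds out) := by unfold Spec_get_angles; infer_instance

-- ===== CLAIM (what is proved, stated in full; the proofs are below) =====
def Claim_equal_get_angles : Prop := ∀ (bonds : List (List Int)), Dom_get_angles bonds → Pre_get_angles bonds → Spec_get_angles bonds (get_angles bonds)

-- ===== LEMMAS AND PROOFS =====

-- ---- proof-side vocabulary ----

-- A's inner-loop body as a function of the two bonds
def pvBodyA (b1 b2 : List Int) : List (Int × Int × Int) :=
  let shared := PySem.Set.inter (PySem.Set.ofList b1) (PySem.Set.ofList b2)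
  if shared.length > 0 then
    let s := PySem.List.pyGetD shared 0 0
    let atom1 := PySem.List.pyGetD (b1.filter (fun b => b != s)) 0 0
    let atom2 := PySem.List.pyGetD (b2.filter (fun b => b != s)) 0 0
    let oa := PySem.List.sorted [atom1, atom2] (fun x => x)
    [(PySem.List.pyGetD oa 0 0, s, PySem.List.pyGetD oa 1 0)]
  else []

-- all pairs with the first element strictly earlier in the list
def pvUpper {α β : Type} (f : α → α → List β) : List α → List β
  | [] => []
  | x :: xs => xs.flatMap (f x) ++ pvUpper f xs

-- the (centre atom, first other atom) entries one bond contributes, skipping seen atoms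
def pvEntGo (b : List Int) : List Int → PySem.Set Int → List (Int × Int)
  | [], _ => []
  | s :: t, seen =>
    if PySem.Set.contains seen s then pvEntGo b t seen
    else
      (if (b.filter (fun a => a != s)).isEmpty then [] else
        [(s, PySem.List.pyGetD (b.filter (fun a => a != s)) 0 0)]) ++
      pvEntGo b t (PySem.Set.add seen s)

def pvEnt (b : List Int) : List (Int × Int) := pvEntGo b b PySem.Set.empty

-- closed form of the entry stream B feeds into the adjacency dict
def pvPairsOf (bonds : List (List Int)) : List (Int × Int) := bonds.flatMap pvEnt

-- neighbours of centre c in an entry list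
def pvNeigh (c : Int) (ps : List (Int × Int)) : List Int :=
  (ps.filter (fun p => p.1 == c)).map (fun p => p.2)

-- B's multiset of angles read off entry pairs in list order, without the dict
def pvUpperP : List (Int × Int) → List (Int × Int × Int)
  | [] => []
  | p :: rest => (pvNeigh p.1 rest).map (fun b => pvTri p.2 p.1 b) ++ pvUpperP rest

-- ---- generic permutation facts ----

theorem pv_flatMap_append_perm {α β : Type} (l : List α) (f g : α → List β) :
    (l.flatMap f ++ l.flatMap g).Perm (l.flatMap (fun x => f x ++ g x)) := by
  induction l with
  | nil => simp
  | cons x t ih =>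
    simp only [List.flatMap_cons, List.append_assoc]
    refine List.Perm.append_left (f x) ?_
    have h1 : (t.flatMap f ++ (g x ++ t.flatMap g)).Perm ((g x ++ t.flatMap f) ++ t.flatMap g) := by
      rw [← List.append_assoc]
      exact (List.perm_append_comm).append_right _
    refine h1.trans ?_
    rw [List.append_assoc]
    exact List.Perm.append_left (g x) ih

theorem pv_flatMap_comm_perm {α β γ : Type} (l1 : List α) (l2 : List β) (g : α → β → List γ) :
    (l1.flatMap (fun a => l2.flatMap (g a))).Perm
      (l2.flatMap (fun b => l1.flatMap (fun a => g a b))) := by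
  induction l1 with
  | nil => simp
  | cons a t ih =>
    rw [List.flatMap_cons]
    refine (List.Perm.append_left _ ih).trans ?_
    refine (pv_flatMap_append_perm l2 (g a) (fun b => t.flatMap (fun a' => g a' b))).trans ?_
    simp [List.flatMap_cons]

-- ---- A-side: the nested enumerate loops are the strictly-upper pair sweep ----

theorem pv_enum_cons {α : Type} (x : α) (t : List α) (k : Int) :
    PySem.List.enumerate (x :: t) k = (k, x) :: PySem.List.enumerate t (k + 1) := rfl

theorem pv_enum_ge {α : Type} (xs : List α) (k : Int) :
    ∀ p ∈ PySem.List.enumerate xs k, k ≤ p.1 := by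
  induction xs generalizing k with
  | nil => intro p hp; simp [PySem.List.enumerate] at hp
  | cons x t ih =>
    intro p hp
    rw [pv_enum_cons, List.mem_cons] at hp
    rcases hp with h | h
    · simp [h]
    · have := ih (k + 1) p h; omega

theorem pv_enum_flatMap {α β : Type} (g : α → List β) (xs : List α) (k : Int) :
    (PySem.List.enumerate xs k).flatMap (fun p => g p.2) = xs.flatMap g := by
  induction xs generalizing k with
  | nil => rfl
  | cons x t ih => rw [pv_enum_cons]; simp only [List.flatMap_cons, ih]

theorem pv_enum_upper {α β : Type} (f : α → α → List β) (xs : List α) (k : Int) :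
    (PySem.List.enumerate xs k).flatMap (fun p1 =>
      (PySem.List.enumerate xs k).flatMap (fun p2 =>
        if p1.1 < p2.1 then f p1.2 p2.2 else [])) = pvUpper f xs := by
  induction xs generalizing k with
  | nil => rfl
  | cons x t ih =>
    rw [pv_enum_cons]
    simp only [List.flatMap_cons, lt_irrefl, if_false, List.nil_append]
    have h1 : (PySem.List.enumerate t (k + 1)).flatMap
        (fun p2 => if k < p2.1 then f x p2.2 else []) = t.flatMap (f x) := by
      rw [List.flatMap_congr (g := fun p2 => f x p2.2) ?_, pv_enum_flatMap]
      intro p hp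
      have := pv_enum_ge t (k + 1) p hp
      simp only [if_pos (by omega : k < p.1)]
    have h2 : (PySem.List.enumerate t (k + 1)).flatMap (fun p1 =>
        (if p1.1 < k then f p1.2 x else []) ++
          (PySem.List.enumerate t (k + 1)).flatMap (fun p2 =>
            if p1.1 < p2.1 then f p1.2 p2.2 else [])) = pvUpper f t := by
      rw [List.flatMap_congr (g := fun p1 => (PySem.List.enumerate t (k + 1)).flatMap
            (fun p2 => if p1.1 < p2.1 then f p1.2 p2.2 else [])) ?_, ih]
      intro p hp
      have := pv_enum_ge t (k + 1) p hp
      simp only [if_neg (by omega : ¬ p.1 < k), List.nil_append]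
    rw [h1, h2, pvUpper]

theorem pv_getA_eq (bonds : List (List Int)) :
    get_angles bonds = PySem.List.sorted (pvUpper pvBodyA bonds) pvKey := by
  unfold get_angles
  rw [← pv_enum_upper pvBodyA bonds 0]
  rw [PySem.List.foldl_congr_mem (g := fun acc p1 => acc ++
    (PySem.List.enumerate bonds).flatMap (fun p2 =>
      if p1.1 < p2.1 then pvBodyA p1.2 p2.2 else []))]
  · rw [PySem.List.foldl_append_eq_flatMap]; rfl
  · intro acc p1 _
    rw [PySem.List.foldl_congr_mem (g := fun acc p2 => acc ++
      (if p1.1 < p2.1 then pvBodyA p1.2 p2.2 else []))]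
    · rw [PySem.List.foldl_append_eq_flatMap]
    · intro acc2 p2 _
      show (if p2.1 > p1.1 then _ else acc2) = acc2 ++ _
      by_cases h : p1.1 < p2.1
      · simp only [gt_iff_lt, h, if_pos]
        unfold pvBodyA
        split <;> simp_all [List.length_pos_iff]
      · simp [gt_iff_lt, h]

-- ---- A's body on a pair of bonds, by their shared atoms ----

theorem pv_sorted_pair (a b : Int) :
    PySem.List.sorted [a, b] (fun x => x) = if a ≤ b then [a, b] else [b, a] := by
  by_cases h : a ≤ b
  · simp only [h, if_true]
    exact PySem.List.sorted_id_eq_of_perm_of_pairwise _ _ (List.Perm.refl _) (by simp [h])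
  · simp only [h, if_false]
    exact PySem.List.sorted_id_eq_of_perm_of_pairwise _ _ (List.Perm.swap _ _ _) (by simp; omega)

theorem pv_commons_mem (b1 b2 : List Int) (a : Int) :
    a ∈ pvCommons b1 b2 ↔ a ∈ b1 ∧ a ∈ b2 := by
  rw [pvCommons, PySem.Set.inter, List.mem_filter, PySem.Set.mem_ofList]
  constructor
  · rintro ⟨h1, h2⟩
    refine ⟨h1, ?_⟩
    have := List.contains_iff_mem.mp h2
    rwa [PySem.Set.mem_ofList] at this
  · rintro ⟨h1, h2⟩
    exact ⟨h1, List.contains_iff_mem.mpr ((PySem.Set.mem_ofList _ _).mpr h2)⟩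

theorem pv_bodyA_none (b1 b2 : List Int) (h : pvCommons b1 b2 = []) :
    pvBodyA b1 b2 = [] := by
  rw [pvBodyA, show PySem.Set.inter (PySem.Set.ofList b1) (PySem.Set.ofList b2)
    = pvCommons b1 b2 from rfl, h]
  rfl

theorem pv_bodyA_single (b1 b2 : List Int) (s : Int) (h : pvCommons b1 b2 = [s]) :
    pvBodyA b1 b2 = [pvTri (PySem.List.pyGetD (b1.filter (fun a => a != s)) 0 0) s
      (PySem.List.pyGetD (b2.filter (fun a => a != s)) 0 0)] := by
  rw [pvBodyA, show PySem.Set.inter (PySem.Set.ofList b1) (PySem.Set.ofList b2)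
    = pvCommons b1 b2 from rfl, h]
  have g1 : ∀ a : Int, PySem.List.pyGetD [a] (0:Int) (0:Int) = a := fun _ => rfl
  have g2 : ∀ a b : Int, PySem.List.pyGetD [a, b] (0:Int) (0:Int) = a := fun _ _ => rfl
  have g3 : ∀ a b : Int, PySem.List.pyGetD [a, b] (1:Int) (0:Int) = b := fun _ _ => rfl
  simp only [g1, pv_sorted_pair]
  set x := PySem.List.pyGetD (b1.filter (fun a => a != s)) 0 0
  set y := PySem.List.pyGetD (b2.filter (fun a => a != s)) 0 0
  by_cases hle : x ≤ y <;> simp [pvTri, hle, g2, g3]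

-- ---- B-side: what one bond contributes to the adjacency dict ----

theorem pv_entGo_mem (b : List Int) (t : List Int) :
    ∀ (seen : PySem.Set Int) (p : Int × Int), p ∈ pvEntGo b t seen ↔
      (p.1 ∈ t ∧ p.1 ∉ seen ∧ (b.filter (fun a => a != p.1)).isEmpty = false ∧
        p.2 = PySem.List.pyGetD (b.filter (fun a => a != p.1)) 0 0) := by
  induction t with
  | nil => intro seen p; simp [pvEntGo]
  | cons s t ih =>
    intro seen p
    rw [pvEntGo]
    by_cases hc : PySem.Set.contains seen s
    · rw [if_pos hc, ih]
      have hs : s ∈ seen := List.contains_iff_mem.mp hc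
      constructor
      · rintro ⟨h1, h2, h3, h4⟩; exact ⟨List.mem_cons_of_mem _ h1, h2, h3, h4⟩
      · rintro ⟨h1, h2, h3, h4⟩
        rcases List.mem_cons.mp h1 with rfl | h1
        · exact absurd hs h2
        · exact ⟨h1, h2, h3, h4⟩
    · rw [if_neg hc, List.mem_append, ih]
      have hs : s ∉ seen := fun h => hc (List.contains_iff_mem.mpr h)
      rw [PySem.Set.mem_add]
      constructor
      · rintro (h | ⟨h1, h2, h3, h4⟩)
        · split at h
          · simp at h
          · rename_i hemp
            rw [List.mem_singleton] at h
            subst h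
            exact ⟨List.mem_cons_self, hs, by simpa using hemp, rfl⟩
        · exact ⟨List.mem_cons_of_mem _ h1, fun h => h2 (Or.inl h), h3, h4⟩
      · rintro ⟨h1, h2, h3, h4⟩
        rcases List.mem_cons.mp h1 with h1 | h1
        · left
          rw [if_neg (by simp [← h1, h3])]
          rw [List.mem_singleton]
          obtain ⟨p1, p2⟩ := p
          simp only at h1 h4 ⊢
          rw [h4, h1]
        · by_cases hps : p.1 = s
          · left
            rw [if_neg (by simp [← hps, h3]), List.mem_singleton]
            obtain ⟨p1, p2⟩ := p
            simp only at hps h4 ⊢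
            rw [h4, hps]
          · right; exact ⟨h1, fun h => (h.elim h2 hps), h3, h4⟩

theorem pv_entGo_fst_nodup (b : List Int) (t : List Int) :
    ∀ seen, ((pvEntGo b t seen).map (fun p => p.1)).Nodup := by
  induction t with
  | nil => intro seen; simp [pvEntGo]
  | cons s t ih =>
    intro seen
    rw [pvEntGo]
    split
    · exact ih seen
    · split
      · simpa using ih _
      · simp only [List.singleton_append, List.map_cons, List.nodup_cons]
        refine ⟨?_, ih _⟩
        intro hmem
        rw [List.mem_map] at hmem
        obtain ⟨q, hq, hq1⟩ := hmem
        rw [pv_entGo_mem] at hq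
        exact hq.2.1 ((PySem.Set.mem_add _ _ _).mpr (Or.inr hq1))

theorem pv_ent_mem (b : List Int) (p : Int × Int) : p ∈ pvEnt b ↔
    (p.1 ∈ b ∧ (b.filter (fun a => a != p.1)).isEmpty = false ∧
      p.2 = PySem.List.pyGetD (b.filter (fun a => a != p.1)) 0 0) := by
  rw [pvEnt, pv_entGo_mem]
  simp [PySem.Set.empty]

theorem pv_ent_fst_nodup (b : List Int) : ((pvEnt b).map (fun p => p.1)).Nodup :=
  pv_entGo_fst_nodup b b _

-- ---- B-side: the two-accumulator bond loop feeds exactly pvPairsOf into the dict ----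

theorem pv_inner_eq (b : List Int) (t : List Int) :
    ∀ (seen : PySem.Set Int) (d : PySem.Dict Int (List Int)),
    (t.foldl (fun (st : PySem.Set Int × PySem.Dict Int (List Int)) s =>
        if PySem.Set.contains st.1 s then st
        else
          let seen := PySem.Set.add st.1 s
          let others := b.filter (fun a => a != s)
          if others.isEmpty then (seen, st.2)
          else (seen, st.2.modify s [] (fun l => l ++ [PySem.List.pyGetD others 0 0])))
      (seen, d)).2 =
    (pvEntGo b t seen).foldl (fun d p => d.modify p.1 [] (fun l => l ++ [p.2])) d := by
  induction t with
  | nil => intro seen d; rfl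
  | cons s t ih =>
    intro seen d
    rw [List.foldl_cons, pvEntGo]
    by_cases hc : PySem.Set.contains seen s
    · rw [if_pos hc, if_pos hc]
      exact ih seen d
    · rw [if_neg hc, if_neg hc]
      by_cases he : (b.filter (fun a => a != s)).isEmpty
      · rw [if_pos he, if_pos he]
        simpa using ih (PySem.Set.add seen s) d
      · rw [if_neg he, if_neg he]
        simpa using ih (PySem.Set.add seen s) _

theorem pv_adj_eq (bonds : List (List Int)) :
    ∀ d, (bonds.foldl (fun adj b =>
      (b.foldl (fun (st : PySem.Set Int × PySem.Dict Int (List Int)) s =>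
          if PySem.Set.contains st.1 s then st
          else
            let seen := PySem.Set.add st.1 s
            let others := b.filter (fun a => a != s)
            if others.isEmpty then (seen, st.2)
            else (seen, st.2.modify s [] (fun l => l ++ [PySem.List.pyGetD others 0 0])))
        (PySem.Set.empty, adj)).2) d) =
    (pvPairsOf bonds).foldl (fun d p => d.modify p.1 [] (fun l => l ++ [p.2])) d := by
  induction bonds with
  | nil => intro d; rfl
  | cons b rest ih =>
    intro d
    rw [List.foldl_cons]
    have : pvPairsOf (b :: rest) = pvEnt b ++ pvPairsOf rest := by simp [pvPairsOf]
    rw [this, List.foldl_append]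
    simp only [pvEnt]
    rw [← pv_inner_eq b b PySem.Set.empty d]
    exact ih _

theorem pv_getB_eq (bonds : List (List Int)) :
    get_angles_alt bonds = PySem.List.sorted
      ((PySem.Set.ofList ((pvPairsOf bonds).map (fun p => p.1))).flatMap
        (fun c => pvAnglesAt c (pvNeigh c (pvPairsOf bonds)))) pvKey := by
  unfold get_angles_alt
  show PySem.List.sorted
      ((bonds.foldl (fun adj b =>
        (b.foldl (fun (st : PySem.Set Int × PySem.Dict Int (List Int)) s =>
            if PySem.Set.contains st.1 s then st
            else
              let seen := PySem.Set.add st.1 s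
              let others := b.filter (fun a => a != s)
              if others.isEmpty then (seen, st.2)
              else (seen, st.2.modify s [] (fun l => l ++ [PySem.List.pyGetD others 0 0])))
          (PySem.Set.empty, adj)).2) PySem.Dict.empty).items.foldl
        (fun acc ci => acc ++ pvAnglesAt ci.1 ci.2) []) pvKey = _
  rw [pv_adj_eq bonds PySem.Dict.empty]
  congr 1
  set ps := pvPairsOf bonds with hps
  set adj := ps.foldl (fun d p => d.modify p.1 [] (fun l => l ++ [p.2])) PySem.Dict.empty with hadj
  have hkeys : adj.keys = PySem.Set.ofList (ps.map (fun p => p.1)) := by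
    rw [hadj, PySem.Dict.keys_foldl_modify_key ps (fun p => p.1) [] (fun _ p => fun l => l ++ [p.2])]
    rfl
  have hnodup : adj.keys.Nodup := by
    rw [hadj]
    exact PySem.Dict.nodup_keys_foldl_modify_key ps (fun p => p.1) []
      (fun _ p => fun l => l ++ [p.2]) _ (by simp [PySem.Dict.empty])
  have hgetD : ∀ c, adj.getD c [] = pvNeigh c ps := by
    intro c
    rw [hadj, PySem.Dict.getD_foldl_modify_append]
    simp [pvNeigh, PySem.Dict.getD_empty]
  have hitems : adj.items = (PySem.Set.ofList (ps.map (fun p => p.1))).map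
      (fun c => (c, pvNeigh c ps)) := by
    rw [PySem.Dict.items_eq_map_keys adj hnodup [], hkeys]
    exact List.map_congr_left (fun k _ => by rw [hgetD])
  rw [hitems, PySem.List.foldl_append_eq_flatMap, List.nil_append, List.flatMap_map]

-- pulling one centre's group to the front of the grouped flatMap
theorem pv_pull {γ : Type} (h : Int → List γ) (c0 : Int) (ks : List Int)
    (hnil : c0 ∉ ks → h c0 = []) :
    ((PySem.Set.ofList ks).flatMap h).Perm
      (h c0 ++ (((PySem.Set.ofList ks).filter (fun y => decide (y ≠ c0))).flatMap h)) := by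
  by_cases hc : c0 ∈ ks
  · have hnd : ((c0 :: (PySem.Set.ofList ks).filter (fun y => decide (y ≠ c0)))).Nodup := by
      refine List.Nodup.cons ?_ ((PySem.Set.nodup_ofList ks).filter _)
      intro hmem
      have := List.of_mem_filter hmem
      simp at this
    have h1 : (PySem.Set.ofList ks).Perm
        (c0 :: (PySem.Set.ofList ks).filter (fun y => decide (y ≠ c0))) := by
      rw [List.perm_ext_iff_of_nodup (PySem.Set.nodup_ofList ks) hnd]
      intro a
      by_cases ha : a = c0
      · subst ha
        simp [PySem.Set.mem_ofList, hc]
      · simp [List.mem_filter, PySem.Set.mem_ofList, ha]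
    have h2 := h1.flatMap (g := h) (fun a _ => List.Perm.refl _)
    rw [List.flatMap_cons] at h2
    exact h2
  · have h0 : h c0 = [] := hnil hc
    have hfe : (PySem.Set.ofList ks).filter (fun y => decide (y ≠ c0)) = PySem.Set.ofList ks := by
      apply List.filter_eq_self.mpr
      intro a ha
      have : a ∈ ks := (PySem.Set.mem_ofList ks a).mp ha
      simp
      rintro rfl; exact hc this
    rw [h0, hfe, List.nil_append]

-- grouping by centre is a permutation of scanning the entry pairs in order
theorem pv_core (ps : List (Int × Int)) :
    ((PySem.Set.ofList (ps.map (fun p => p.1))).flatMap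
      (fun c => pvAnglesAt c (pvNeigh c ps))).Perm (pvUpperP ps) := by
  induction ps with
  | nil => simp [pvUpperP, PySem.Set.ofList]
  | cons p rest ih =>
    obtain ⟨c0, n0⟩ := p
    set h' : Int → List (Int × Int × Int) := fun c => pvAnglesAt c (pvNeigh c rest) with hh'
    have hneigh_eq : ∀ c, c ≠ c0 → pvNeigh c ((c0, n0) :: rest) = pvNeigh c rest := by
      intro c hcne
      simp only [pvNeigh, List.filter_cons]
      rw [if_neg (by simp [Ne.symm hcne])]
    have hneigh_c0 : pvNeigh c0 ((c0, n0) :: rest) = n0 :: pvNeigh c0 rest := by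
      simp [pvNeigh]
    have hmain := pv_pull (fun c => pvAnglesAt c (pvNeigh c ((c0, n0) :: rest))) c0
      (((c0, n0) :: rest).map (fun p => p.1)) (by intro hmem; simp at hmem)
    refine hmain.trans ?_
    -- the filtered key list: members ≠ c0, so the group function may drop the head entry
    have hflt : ((PySem.Set.ofList (((c0, n0) :: rest).map (fun p => p.1))).filter
        (fun y => decide (y ≠ c0))).flatMap (fun c => pvAnglesAt c (pvNeigh c ((c0, n0) :: rest)))
        = ((PySem.Set.ofList (((c0, n0) :: rest).map (fun p => p.1))).filter
        (fun y => decide (y ≠ c0))).flatMap h' := by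
      apply List.flatMap_congr
      intro y hy
      have hyne : y ≠ c0 := by simpa using List.of_mem_filter hy
      rw [hneigh_eq y hyne]
    rw [hflt]
    -- the filtered key list is a permutation of the tail's filtered key list
    have hpermflt : (((PySem.Set.ofList (((c0, n0) :: rest).map (fun p => p.1))).filter
        (fun y => decide (y ≠ c0)))).Perm
        ((PySem.Set.ofList (rest.map (fun p => p.1))).filter (fun y => decide (y ≠ c0))) := by
      rw [List.perm_ext_iff_of_nodup ((PySem.Set.nodup_ofList _).filter _)
        ((PySem.Set.nodup_ofList _).filter _)]
      intro a
      simp only [List.mem_filter, PySem.Set.mem_ofList, List.map_cons, List.mem_cons]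
      constructor
      · rintro ⟨h1 | h1, h2⟩
        · simp at h2; exact absurd h1 h2
        · exact ⟨h1, h2⟩
      · rintro ⟨h1, h2⟩; exact ⟨Or.inr h1, h2⟩
    have hback := pv_pull h' c0 (rest.map (fun p => p.1)) ?hnil
    case hnil =>
      intro hmem
      have : pvNeigh c0 rest = [] := by
        unfold pvNeigh
        rw [List.filter_eq_nil_iff.mpr ?_]
        · rfl
        · intro q hq
          simp only [beq_iff_eq]
          intro hq1
          exact hmem (by simpa [← hq1] using List.mem_map_of_mem (f := fun p => p.1) hq)
      rw [hh']; simp [this, pvAnglesAt]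
    have hc0 : pvAnglesAt c0 (pvNeigh c0 ((c0, n0) :: rest))
        = (pvNeigh c0 rest).map (fun b => pvTri n0 c0 b) ++ h' c0 := by
      rw [hneigh_c0]; rfl
    beta_reduce
    rw [hc0, pvUpperP, List.append_assoc]
    refine List.Perm.append_left _ ?_
    refine ((List.Perm.append_left _ (hpermflt.flatMap (fun a _ => List.Perm.refl _))).trans ?_)
    exact (hback.symm.trans ih)

-- ---- tying the two sides together on Pre_ inputs ----

theorem pv_neigh_append (c : Int) (ps qs : List (Int × Int)) :
    pvNeigh c (ps ++ qs) = pvNeigh c ps ++ pvNeigh c qs := by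
  simp [pvNeigh]

theorem pv_neigh_flatMap {α : Type} (c : Int) (g : α → List (Int × Int)) (l : List α) :
    pvNeigh c (l.flatMap g) = l.flatMap (fun a => pvNeigh c (g a)) := by
  induction l with
  | nil => rfl
  | cons a t ih => rw [List.flatMap_cons, pv_neigh_append, ih, List.flatMap_cons]

theorem pv_upperP_append (E ps : List (Int × Int)) (hnd : (E.map (fun p => p.1)).Nodup) :
    pvUpperP (E ++ ps) =
      E.flatMap (fun e => (pvNeigh e.1 ps).map (fun o => pvTri e.2 e.1 o)) ++ pvUpperP ps := by
  induction E with
  | nil => simp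
  | cons e E ih =>
    rw [List.cons_append, pvUpperP, pv_neigh_append]
    have h0 : pvNeigh e.1 E = [] := by
      rw [pvNeigh, List.filter_eq_nil_iff.mpr, List.map_nil]
      intro q hq
      simp only [beq_iff_eq]
      rw [List.map_cons, List.nodup_cons] at hnd
      exact fun h => hnd.1 (h ▸ List.mem_map_of_mem (f := fun p => p.1) hq)
    rw [h0, List.nil_append, ih (by rw [List.map_cons, List.nodup_cons] at hnd; exact hnd.2),
      List.flatMap_cons, List.append_assoc]

theorem pv_flatMap_single {β : Type} (L : List (Int × Int)) (s o : Int)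
    (f : Int × Int → List β) (hnd : (L.map (fun p => p.1)).Nodup) (hmem : (s, o) ∈ L)
    (hf : ∀ e ∈ L, e.1 ≠ s → f e = []) : L.flatMap f = f (s, o) := by
  induction L with
  | nil => simp at hmem
  | cons e t ih =>
    rw [List.map_cons, List.nodup_cons] at hnd
    rw [List.flatMap_cons]
    by_cases he : e = (s, o)
    · subst he
      have ht : t.flatMap f = [] := by
        rw [List.flatMap_eq_nil_iff]
        intro q hq
        exact hf q (List.mem_cons_of_mem _ hq)
          (fun h => hnd.1 (h ▸ List.mem_map_of_mem (f := fun p => p.1) hq))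
      rw [ht, List.append_nil]
    · have hmem' : (s, o) ∈ t := by
        rcases List.mem_cons.mp hmem with h | h
        · exact absurd h.symm he
        · exact h
      have he1 : e.1 ≠ s := by
        intro h
        exact hnd.1 (h ▸ List.mem_map_of_mem (f := fun p => p.1) hmem')
      rw [hf e List.mem_cons_self he1, List.nil_append]
      exact ih hnd.2 hmem' (fun q hq => hf q (List.mem_cons_of_mem _ hq))

theorem pv_filter_fst_single (L : List (Int × Int)) (s o : Int)
    (hnd : (L.map (fun p => p.1)).Nodup) (hmem : (s, o) ∈ L) :
    L.filter (fun q => q.1 == s) = [(s, o)] := by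
  induction L with
  | nil => simp at hmem
  | cons e t ih =>
    rw [List.map_cons, List.nodup_cons] at hnd
    rw [List.filter_cons]
    by_cases he : e = (s, o)
    · subst he
      rw [if_pos (by simp)]
      have : t.filter (fun q => q.1 == s) = [] := by
        rw [List.filter_eq_nil_iff]
        intro q hq
        simp only [beq_iff_eq]
        exact fun h => hnd.1 (h ▸ List.mem_map_of_mem (f := fun p => p.1) hq)
      rw [this]
    · have hmem' : (s, o) ∈ t := by
        rcases List.mem_cons.mp hmem with h | h
        · exact absurd h.symm he
        · exact h
      have he1 : e.1 ≠ s := fun h => hnd.1 (h ▸ List.mem_map_of_mem (f := fun p => p.1) hmem')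
      rw [if_neg (by simp [he1])]
      exact ih hnd.2 hmem'

-- no entry of b' is a neighbour of atom c of b when c is not an atom of b'
theorem pv_neigh_ent_nil (b' : List Int) (c : Int) (hc : c ∉ b') :
    pvNeigh c (pvEnt b') = [] := by
  rw [pvNeigh, List.filter_eq_nil_iff.mpr, List.map_nil]
  intro q hq
  simp only [beq_iff_eq]
  intro h
  exact hc (h ▸ ((pv_ent_mem b' q).mp hq).1)

-- per partner bond, B's neighbour pairs around each shared atom are exactly A's body
theorem pv_cross_eq (b b' : List Int)
    (hlen : (pvCommons b b').length ≤ 1)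
    (hoth : ∀ s ∈ pvCommons b b',
      b.filter (fun a => a != s) ≠ [] ∧ b'.filter (fun a => a != s) ≠ []) :
    (pvEnt b).flatMap (fun e => (pvNeigh e.1 (pvEnt b')).map (fun o => pvTri e.2 e.1 o))
      = pvBodyA b b' := by
  match hc : pvCommons b b' with
  | [] =>
    rw [pv_bodyA_none b b' hc, List.flatMap_eq_nil_iff]
    intro e he
    rw [pv_neigh_ent_nil b' e.1 ?_, List.map_nil]
    intro hmem
    have h1 : e.1 ∈ b := ((pv_ent_mem b e).mp he).1
    have : e.1 ∈ pvCommons b b' := (pv_commons_mem b b' e.1).mpr ⟨h1, hmem⟩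
    rw [hc] at this
    simp at this
  | s :: tail =>
    have htail : tail = [] := by
      have := hlen
      rw [hc] at this
      simp at this
      omega
    subst htail
    have hsc : s ∈ pvCommons b b' := by rw [hc]; exact List.mem_cons_self
    obtain ⟨hsb, hsb'⟩ := (pv_commons_mem b b' s).mp hsc
    obtain ⟨ho1, ho2⟩ := hoth s hsc
    rw [pv_bodyA_single b b' s hc]
    have hmem1 : (s, PySem.List.pyGetD (b.filter (fun a => a != s)) 0 0) ∈ pvEnt b := by
      rw [pv_ent_mem]
      exact ⟨hsb, by simpa using ho1, rfl⟩
    rw [pv_flatMap_single (pvEnt b) s (PySem.List.pyGetD (b.filter (fun a => a != s)) 0 0) _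
      (pv_ent_fst_nodup b) hmem1 ?_]
    · have hmem2 : (s, PySem.List.pyGetD (b'.filter (fun a => a != s)) 0 0) ∈ pvEnt b' := by
        rw [pv_ent_mem]
        exact ⟨hsb', by simpa using ho2, rfl⟩
      have : pvNeigh s (pvEnt b') = [PySem.List.pyGetD (b'.filter (fun a => a != s)) 0 0] := by
        rw [pvNeigh, pv_filter_fst_single (pvEnt b') s _ (pv_ent_fst_nodup b') hmem2]
        rfl
      simp only [this, List.map_cons, List.map_nil]
    · intro e he hne
      rw [pv_neigh_ent_nil b' e.1 ?_, List.map_nil]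
      intro hmem
      have h1 : e.1 ∈ b := ((pv_ent_mem b e).mp he).1
      have : e.1 ∈ pvCommons b b' := (pv_commons_mem b b' e.1).mpr ⟨h1, hmem⟩
      rw [hc] at this
      exact hne (by simpa using this)

theorem pv_upperP_eq (bonds : List (List Int)) (hpre : Pre_get_angles bonds) :
    (pvUpperP (pvPairsOf bonds)).Perm (pvUpper pvBodyA bonds) := by
  induction bonds with
  | nil => exact List.Perm.refl _
  | cons b rest ih =>
    rw [Pre_get_angles, List.pairwise_cons] at hpre
    rw [show (List.Pairwise _ rest) = Pre_get_angles rest from rfl] at hpre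
    have hpairs : pvPairsOf (b :: rest) = pvEnt b ++ pvPairsOf rest := by simp [pvPairsOf]
    rw [hpairs, pv_upperP_append _ _ (pv_ent_fst_nodup b), pvUpper]
    refine List.Perm.append ?_ (ih hpre.2)
    rw [show pvPairsOf rest = rest.flatMap pvEnt from rfl]
    have hrw : (pvEnt b).flatMap (fun e =>
        (pvNeigh e.1 (rest.flatMap pvEnt)).map (fun o => pvTri e.2 e.1 o)) =
        (pvEnt b).flatMap (fun e =>
          rest.flatMap (fun b' => (pvNeigh e.1 (pvEnt b')).map (fun o => pvTri e.2 e.1 o))) := by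
      apply List.flatMap_congr
      intro e _
      rw [pv_neigh_flatMap, List.map_flatMap]
    rw [hrw]
    refine (pv_flatMap_comm_perm (pvEnt b) rest _).trans ?_
    rw [List.flatMap_congr (g := pvBodyA b) ?_]
    intro b' hb'
    exact pv_cross_eq b b' (hpre.1 b' hb').1 (hpre.1 b' hb').2

-- Python compares the output triples lexicographically; the key is injective
theorem pv_key_inj : Function.Injective pvKey := by
  intro a b h
  obtain ⟨a1, a2, a3⟩ := a; obtain ⟨b1, b2, b3⟩ := b
  simpa [pvKey, Prod.ext_iff] using h

-- ===== VERDICT (by name: the statement is the Claim_ definition above) =====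
theorem get_angles_spec : Claim_equal_get_angles := by
  intro bonds _ hpre
  unfold Spec_get_angles
  rw [pv_getA_eq, pv_getB_eq]
  exact PySem.List.sorted_eq_sorted_of_perm _ _ _ pv_key_inj
    ((pv_core (pvPairsOf bonds)).trans (pv_upperP_eq bonds hpre)).symm
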